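-- pv_equiv track=rewrite | github.com/Melodiz/dailycode | HSE/ADS_contests/Graphs_2/Bellman_Ford2.py | solve
-- ===== SOURCE A (Python) =====
-- def solve(n):
--     INF = float('inf')
--     dist = [INF] * (n + 1)
--     dist[1] = 0
--
--     def weight(i, j):
--         return (179 * i + 719 * j) % 1000 - 500
--
--     for i in range(1, n):
--         for j in range(i + 1, n + 1):
--             if dist[i] != INF and dist[j] > dist[i] + weight(i, j):
--                 dist[j] = dist[i] + weight(i, j)
--
--     return dist[n]
-- ===== SOURCE B (Python) =====
-- def solve(n):
--     # Bucket dist by i mod 1000: the edge weight (179*i+719*j)%1000-500 depends on i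
--     # only through i % 1000, so the best predecessor per residue class suffices.
--     INF = float('inf')
--     best = [INF] * 1000          # best[r] = min dist over processed nodes i with i % 1000 == r
--     best[1] = 0                  # node 1 has dist 0
--     ans = 0                      # dist of node 1, returned when n == 1
--     for j in range(2, n + 1):
--         dj = min(best[r] + ((179 * r + 719 * j) % 1000 - 500)
--                  for r in range(1000) if best[r] != INF)
--         r = j % 1000
--         if dj < best[r]:
--             best[r] = dj
--         ans = dj
--     return ans
-- ===== Notes on version B (the rewrite author's own statement) =====
-- stated objective: faster
-- what changed: Instead of O(n^2) pairwise relaxation over all edges, B exploits that the edge weight depends on the source i only through i mod 1000, keeping the minimum dist per residue class and scanning 1000 residues per node.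
import Mathlib
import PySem

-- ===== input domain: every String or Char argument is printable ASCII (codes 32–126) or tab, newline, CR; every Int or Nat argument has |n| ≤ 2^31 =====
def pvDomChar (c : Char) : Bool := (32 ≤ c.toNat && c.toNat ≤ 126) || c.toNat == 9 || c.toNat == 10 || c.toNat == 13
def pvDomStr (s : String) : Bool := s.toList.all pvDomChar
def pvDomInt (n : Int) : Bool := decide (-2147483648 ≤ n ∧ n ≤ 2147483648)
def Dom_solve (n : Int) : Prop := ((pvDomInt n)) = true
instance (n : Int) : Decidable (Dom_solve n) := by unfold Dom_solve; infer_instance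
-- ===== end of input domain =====

-- B replaces A's O(n^2) pairwise relaxation by a per-residue bucket minimum (the edge
-- weight depends on the source i only through i mod 1000), scanning 1000 residues per node: faster.


-- ===== PORT A =====
-- A's nested helper `weight`
def weight (i j : Int) : Int := PySem.Int.mod (179 * i + 719 * j) 1000 - 500

-- `none` plays float('inf'); for n ≥ 1 (Pre_) every index below is in range, so pyGetD/pySetD are exact.
-- body of the inner `for j` loop: relax edge (i, j)
def innerStepA (i : Int) (dist : List (Option Int)) (j : Int) : List (Option Int) :=
  match PySem.List.pyGetD dist i none with
  | none => dist                                -- dist[i] == INF: no relaxation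
  | some vi =>
    match PySem.List.pyGetD dist j none with
    | none => PySem.List.pySetD dist j (some (vi + weight i j))   -- dist[j] == INF > anything
    | some vj =>
      if vi + weight i j < vj then PySem.List.pySetD dist j (some (vi + weight i j)) else dist

-- body of the outer `for i` loop
def outerStepA (n : Int) (dist : List (Option Int)) (i : Int) : List (Option Int) :=
  (PySem.List.pyRange (i + 1) (n + 1) 1).foldl (innerStepA i) dist

def solve (n : Int) : Int :=
  let dist0 : List (Option Int) := List.replicate (n + 1).toNat (none : Option Int)
  let dist1 := PySem.List.pySetD dist0 1 (some 0)               -- dist[1] = 0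
  let dist := (PySem.List.pyRange 1 n 1).foldl (outerStepA n) dist1
  (PySem.List.pyGetD dist n none).getD 0   -- dist[n]; an int (never inf) for every n ≥ 1

-- ===== PORT B =====
-- body of B's `for j` loop over the state (best, ans)
def stepB (st : List (Option Int) × Int) (j : Int) : List (Option Int) × Int :=
  let best := st.1
  let cands := (PySem.List.pyRange 0 1000 1).filterMap (fun r =>
      (PySem.List.pyGetD best r none).map
        (fun v => v + (PySem.Int.mod (179 * r + 719 * j) 1000 - 500)))
  let dj := (PySem.List.min? cands (fun x => x)).getD 0   -- cands is nonempty: best[1] is set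
  let r := PySem.Int.mod j 1000
  let best' := match PySem.List.pyGetD best r none with
    | none => PySem.List.pySetD best r (some dj)          -- dj < INF
    | some v => if dj < v then PySem.List.pySetD best r (some dj) else best
  (best', dj)

def solve_alt (n : Int) : Int :=
  let best0 : List (Option Int) := PySem.List.pySetD (List.replicate 1000 (none : Option Int)) 1 (some 0)
  let st := (PySem.List.pyRange 2 (n + 1) 1).foldl stepB (best0, 0)
  st.2

-- ===== PRECONDITION & SPEC =====
-- A raises IndexError (dist[1] on a list of length ≤ 1) for every n ≤ 0; those inputs are excluded.
def Pre_solve (n : Int) : Prop := 1 ≤ n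
instance (n : Int) : Decidable (Pre_solve n) := by unfold Pre_solve; infer_instance
def pvWitness_solve : Int := 3
def Spec_solve (n : Int) (out : Int) : Prop := out = solve_alt n
instance (n : Int) (out : Int) : Decidable (Spec_solve n out) := by unfold Spec_solve; infer_instance

-- ===== CLAIM (what is proved, stated in full; the proofs are below) =====
def Claim_equal_solve : Prop := ∀ (n : Int), Dom_solve n → Pre_solve n → Spec_solve n (solve n)

-- ===== LEMMAS AND PROOFS =====

-- minimum of a nonempty list, Python-style running fold (0 for [] — never used there)
def mn : List Int → Int
  | [] => 0
  | x :: t => t.foldl min x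

-- minimum as an Option (none for [])
def mnO : List Int → Option Int
  | [] => none
  | x :: t => some (t.foldl min x)

-- candidate distances to node j coming from nodes 1..p.length with dist values p
def cand (p : List Int) (j : Int) : List Int :=
  (List.range p.length).map (fun k => p.getD k 0 + weight ((k : Int) + 1) j)

-- p lists the true shortest distances of nodes 1, 2, …, p.length
def SpecP (p : List Int) : Prop :=
  p.getD 0 0 = 0 ∧
  ∀ t : ℕ, 2 ≤ t → t ≤ p.length → p.getD (t - 1) 0 = mn (cand (p.take (t - 1)) (t : Int))

-- the canonical such table: Lspec m = distances of nodes 1..m+1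
def Lspec : ℕ → List Int
  | 0 => [0]
  | m + 1 => Lspec m ++ [mn (cand (Lspec m) ((m : Int) + 2))]

def G (dist : List (Option Int)) (t : Int) : Option Int := PySem.List.pyGetD dist t none

-- best value at node t among predecessors 1..i0 (none if i0 = 0)
def pval (p : List Int) (i0 : ℕ) (t : Int) : Option Int :=
  if i0 = 0 then none else some (mn (cand (p.take i0) t))

-- A's outer-loop invariant after outer iterations 1..i0
def InvA (n : Int) (p : List Int) (i0 : ℕ) (dist : List (Option Int)) : Prop :=
  dist.length = (n + 1).toNat ∧
  G dist 0 = none ∧ G dist 1 = some 0 ∧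
  ∀ t : Int, 2 ≤ t → t ≤ n → G dist t = pval p (min i0 (t - 1).toNat) t

-- A's inner-loop invariant: columns < a already relaxed from node i, columns ≥ a not yet
def InvMid (n : Int) (p : List Int) (i a : Int) (dist : List (Option Int)) : Prop :=
  dist.length = (n + 1).toNat ∧
  G dist 0 = none ∧ G dist 1 = some 0 ∧
  (∀ t : Int, 2 ≤ t → t < a → t ≤ n → G dist t = pval p (min i.toNat (t - 1).toNat) t) ∧
  (∀ t : Int, a ≤ t → t ≤ n → G dist t = pval p (i.toNat - 1) t)

-- B: recorded dist values of nodes 1..j0 falling in residue class r mod 1000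
def resL (p : List Int) (j0 : ℕ) (r : Int) : List Int :=
  ((PySem.List.pyRange 1 ((j0 : Int) + 1) 1).filter (fun i => PySem.Int.mod i 1000 == r)).map
    (fun i => p.getD (i.toNat - 1) 0)

-- B's loop invariant after iterations 2..j0 (j0 ≥ 1)
def InvB (p : List Int) (j0 : ℕ) (st : List (Option Int) × Int) : Prop :=
  st.1.length = 1000 ∧
  (∀ r : Int, 0 ≤ r → r < 1000 → G st.1 r = mnO (resL p j0 r)) ∧
  st.2 = p.getD (j0 - 1) 0

-- ---- basic facts ----

theorem getD_setD (xs : List (Option Int)) (j : Int) (hj : 0 ≤ j) (hjl : j < (xs.length : Int))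
    (v : Option Int) (t : Int) (ht : 0 ≤ t) :
    G (PySem.List.pySetD xs j v) t = if t = j then v else G xs t := by
  unfold G
  rw [PySem.List.pySetD_of_nonneg xs v hj]
  rw [PySem.List.pyGetD_of_nonneg _ _ ht, PySem.List.pyGetD_of_nonneg _ _ ht]
  rw [List.getD_eq_getElem?_getD, List.getD_eq_getElem?_getD, List.getElem?_set]
  by_cases h : t = j
  · subst h; simp [show t.toNat < xs.length by omega]
  · rw [if_neg (by omega), if_neg h]

theorem G_replicate (m : ℕ) (t : Int) (ht : 0 ≤ t) :
    G (List.replicate m (none : Option Int)) t = none := by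
  unfold G
  rw [PySem.List.pyGetD_of_nonneg _ _ ht, List.getD_eq_getElem?_getD]
  simp only [List.getElem?_replicate]
  split <;> rfl

theorem length_Lspec (m : ℕ) : (Lspec m).length = m + 1 := by
  induction m with
  | zero => rfl
  | succ k ih => simp [Lspec, ih]

theorem specP_Lspec (m : ℕ) : SpecP (Lspec m) := by
  induction m with
  | zero => exact ⟨rfl, by intro t h2 h1; simp [length_Lspec] at h1; omega⟩
  | succ mm ih =>
    obtain ⟨ih0, ihr⟩ := ih
    constructor
    · rw [Lspec, List.getD_eq_getElem?_getD, List.getElem?_append_left (by rw [length_Lspec]; omega),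
          ← List.getD_eq_getElem?_getD]
      exact ih0
    · intro t h2 h1
      rw [length_Lspec] at h1
      rcases Nat.lt_or_ge t (mm + 2) with hlt | hge
      · -- t ≤ mm + 1: entry and prefix live in Lspec mm
        have hidx : t - 1 < (Lspec mm).length := by rw [length_Lspec]; omega
        rw [Lspec, List.getD_eq_getElem?_getD, List.getElem?_append_left hidx,
            ← List.getD_eq_getElem?_getD,
            List.take_append_of_le_length (by rw [length_Lspec]; omega)]
        exact ihr t h2 (by rw [length_Lspec]; omega)
      · have ht : t = mm + 2 := by omega
        subst ht
        have hlen : (Lspec mm).length = mm + 1 := length_Lspec mm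
        rw [Lspec, List.getD_eq_getElem?_getD,
            show mm + 2 - 1 = (Lspec mm).length by omega,
            List.getElem?_append_right (le_refl _)]
        simp only [Nat.sub_self, List.getElem?_cons_zero, Option.getD_some]
        rw [List.take_append_of_le_length (by omega), List.take_of_length_le (by omega)]
        norm_cast

theorem mn_append (l : List Int) (x : Int) (h : l ≠ []) : mn (l ++ [x]) = min (mn l) x := by
  cases l with
  | nil => simp at h
  | cons a t => simp [mn, List.foldl_append]

theorem mn_mem (l : List Int) (h : l ≠ []) : mn l ∈ l := by
  cases l with
  | nil => simp at h
  | cons a t =>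
    rcases PySem.List.foldl_min_mem t a with h1 | h1 <;> simp [mn, h1]

theorem mn_le (l : List Int) (x : Int) (hx : x ∈ l) : mn l ≤ x := by
  cases l with
  | nil => simp at hx
  | cons a t =>
    rcases List.mem_cons.mp hx with rfl | h1
    · exact (PySem.List.foldl_min_le t x).1
    · exact (PySem.List.foldl_min_le t a).2 x h1

theorem mn_eq_mn (l1 l2 : List Int) (h1 : l1 ≠ []) (h2 : l2 ≠ [])
    (d1 : ∀ x ∈ l1, ∃ y ∈ l2, y ≤ x) (d2 : ∀ y ∈ l2, ∃ x ∈ l1, x ≤ y) : mn l1 = mn l2 := by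
  apply le_antisymm
  · obtain ⟨x, hx, hxy⟩ := d2 (mn l2) (mn_mem l2 h2)
    exact le_trans (mn_le l1 x hx) hxy
  · obtain ⟨y, hy, hyx⟩ := d1 (mn l1) (mn_mem l1 h1)
    exact le_trans (mn_le l2 y hy) hyx

theorem mnO_eq_some (l : List Int) (h : l ≠ []) : mnO l = some (mn l) := by
  cases l with
  | nil => simp at h
  | cons a t => rfl

theorem mem_cand (q : List Int) (j y : Int) :
    y ∈ cand q j ↔ ∃ k : ℕ, k < q.length ∧ y = q.getD k 0 + weight ((k : Int) + 1) j := by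
  simp [cand, List.mem_map, List.mem_range, eq_comm]

theorem cand_take_succ (p : List Int) (k : ℕ) (hk : k < p.length) (j : Int) :
    cand (p.take (k + 1)) j = cand (p.take k) j ++ [p.getD k 0 + weight ((k : Int) + 1) j] := by
  have h1 : p.take (k+1) = p.take k ++ [p.getD k 0] := by
    rw [List.take_add_one]
    simp [List.getElem?_eq_getElem hk, List.getD_eq_getElem?_getD]
  rw [h1]
  unfold cand
  have hlen : (p.take k ++ [p.getD k 0]).length = k + 1 := by simp; omega
  rw [hlen, List.range_succ, List.map_append]
  congr 1
  · rw [show (List.take k p).length = k by simp; omega]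
    apply List.map_congr_left
    intro a ha
    have ha' : a < k := List.mem_range.mp ha
    congr 1
    rw [List.getD_eq_getElem?_getD, List.getD_eq_getElem?_getD,
        List.getElem?_append_left (by simp; omega), List.getElem?_take]
    simp [ha']
  · simp only [List.map_cons, List.map_nil, List.cons.injEq, and_true]
    congr 1
    rw [List.getD_eq_getElem?_getD, List.getD_eq_getElem?_getD,
        List.getElem?_append_right (by simp)]
    simp [show min k p.length = k by omega]

theorem cand_take_ne_nil (p : List Int) (k : ℕ) (hk : 1 ≤ k) (hp : p ≠ []) (j : Int) :
    cand (p.take k) j ≠ [] := by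
  have hp' : 0 < p.length := List.length_pos_iff.mpr hp
  have h2 : 0 < (cand (p.take k) j).length := by
    simp [cand, List.length_take]
    omega
  exact List.ne_nil_of_length_pos h2

theorem mem_resL (p : List Int) (j0 : ℕ) (r x : Int) :
    x ∈ resL p j0 r ↔ ∃ i : Int, 1 ≤ i ∧ i ≤ (j0 : Int) ∧ PySem.Int.mod i 1000 = r ∧
      x = p.getD (i.toNat - 1) 0 := by
  simp only [resL, List.mem_map, List.mem_filter, PySem.List.mem_pyRange_one, beq_iff_eq]
  constructor
  · rintro ⟨i, ⟨⟨h1, h2⟩, h3⟩, h4⟩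
    exact ⟨i, h1, by omega, h3, h4.symm⟩
  · rintro ⟨i, h1, h2, h3, h4⟩
    exact ⟨i, ⟨⟨h1, by omega⟩, h3⟩, h4.symm⟩

theorem resL_succ (p : List Int) (j0 : ℕ) (r : Int) :
    resL p (j0 + 1) r =
      resL p j0 r ++ (if PySem.Int.mod ((j0 : Int) + 1) 1000 = r then [p.getD j0 0] else []) := by
  unfold resL
  rw [show ((j0 + 1 : ℕ) : Int) + 1 = ((j0 : Int) + 1) + 1 by push_cast; ring,
      PySem.List.pyRange_one_succ_right (by omega), List.filter_append, List.map_append]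
  congr 1
  simp only [List.filter_cons, List.filter_nil, beq_iff_eq]
  split
  · simp
  · simp

theorem weight_mod (i j : Int) :
    weight i j = PySem.Int.mod (179 * PySem.Int.mod i 1000 + 719 * j) 1000 - 500 := by
  unfold weight
  rw [PySem.Int.mod_eq_emod_of_pos (by norm_num), PySem.Int.mod_eq_emod_of_pos (by norm_num),
      PySem.Int.mod_eq_emod_of_pos (by norm_num)]
  omega

theorem invMid_get_i (n : Int) (p : List Int) (i a : Int) (dist : List (Option Int))
    (hp : SpecP p) (hlen : p.length = n.toNat) (hi : 1 ≤ i) (hin : i < n) (hia : i < a)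
    (h : InvMid n p i a dist) : G dist i = some (p.getD (i.toNat - 1) 0) := by
  obtain ⟨_, _, h1, hlt, _⟩ := h
  rcases eq_or_lt_of_le hi with rfl | hi2
  · rw [h1, show Int.toNat 1 - 1 = 0 from rfl, hp.1]
  · have := hlt i (by omega) hia (by omega)
    rw [this]
    unfold pval
    rw [if_neg (by omega), show min i.toNat (i - 1).toNat = i.toNat - 1 by omega]
    congr 1
    have := hp.2 i.toNat (by omega) (by omega)
    rw [show ((i.toNat : ℕ) : Int) = i by omega] at this
    exact this.symm

theorem innerA_step (n : Int) (p : List Int) (i a : Int) (dist : List (Option Int))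
    (hp : SpecP p) (hlen : p.length = n.toNat) (hi : 1 ≤ i) (hin : i < n)
    (hia : i < a) (han : a ≤ n) (h : InvMid n p i a dist) :
    InvMid n p i (a + 1) (innerStepA i dist a) := by
  have hpne : p ≠ [] := by
    intro hc; rw [hc] at hlen; simp at hlen; omega
  obtain ⟨hL, h0, h1, hlt, hge⟩ := h
  have hvi : G dist i = some (p.getD (i.toNat - 1) 0) :=
    invMid_get_i n p i a dist hp hlen hi hin hia ⟨hL, h0, h1, hlt, hge⟩
  have hva : G dist a = pval p (i.toNat - 1) a := hge a (le_refl a) han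
  have hrange_a : (0 : Int) ≤ a ∧ a < (dist.length : Int) := ⟨by omega, by omega⟩
  have hstep : (innerStepA i dist a).length = dist.length ∧
      (∀ t : Int, 0 ≤ t → t ≠ a → G (innerStepA i dist a) t = G dist t) ∧
      G (innerStepA i dist a) a = pval p i.toNat a := by
    unfold innerStepA
    unfold G at hvi
    rw [hvi]
    rcases eq_or_lt_of_le hi with rfl | hi2
    · -- i = 1: dist[a] is still none
      have hnone : PySem.List.pyGetD dist a none = none := by
        have := hva; unfold G at this; rw [this]; simp [pval]
      rw [hnone]
      dsimp only
      refine ⟨by rw [PySem.List.pySetD_of_nonneg _ _ hrange_a.1]; simp, ?_, ?_⟩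
      · intro t ht hta
        rw [getD_setD dist a hrange_a.1 hrange_a.2 _ t ht, if_neg hta]
      · rw [getD_setD dist a hrange_a.1 hrange_a.2 _ a (by omega), if_pos rfl]
        unfold pval
        rw [if_neg (by omega)]
        have hc := cand_take_succ p 0 (by omega) a
        simp only [Nat.zero_add, List.take_zero] at hc
        rw [show Int.toNat 1 = 1 from rfl, hc]
        simp [cand, mn]
    · -- i ≥ 2: dist[a] is a finite partial minimum
      have hk : i.toNat - 1 < p.length := by omega
      have hvj : PySem.List.pyGetD dist a none =
          some (mn (cand (p.take (i.toNat - 1)) a)) := by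
        have := hva; unfold G at this; rw [this]; unfold pval; rw [if_neg (by omega)]
      rw [hvj]
      dsimp only
      have hcand : cand (p.take i.toNat) a =
          cand (p.take (i.toNat - 1)) a ++ [p.getD (i.toNat - 1) 0 + weight i a] := by
        have hc := cand_take_succ p (i.toNat - 1) hk a
        rw [show i.toNat - 1 + 1 = i.toNat by omega,
            show (((i.toNat - 1 : ℕ) : Int) + 1) = i by omega] at hc
        exact hc
      have hgoalval : pval p i.toNat a =
          some (min (mn (cand (p.take (i.toNat - 1)) a)) (p.getD (i.toNat - 1) 0 + weight i a)) := by
        unfold pval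
        rw [if_neg (by omega), hcand,
            mn_append _ _ (cand_take_ne_nil p (i.toNat - 1) (by omega) hpne a)]
      by_cases hcond : p.getD (i.toNat - 1) 0 + weight i a < mn (cand (p.take (i.toNat - 1)) a)
      · rw [if_pos hcond]
        refine ⟨by rw [PySem.List.pySetD_of_nonneg _ _ hrange_a.1]; simp, ?_, ?_⟩
        · intro t ht hta
          rw [getD_setD dist a hrange_a.1 hrange_a.2 _ t ht, if_neg hta]
        · rw [getD_setD dist a hrange_a.1 hrange_a.2 _ a (by omega), if_pos rfl, hgoalval]
          congr 1
          omega
      · rw [if_neg hcond]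
        refine ⟨rfl, fun t _ _ => rfl, ?_⟩
        unfold G
        rw [hvj, hgoalval]
        congr 1
        omega
  -- assemble the new invariant
  obtain ⟨hs1, hs2, hs3⟩ := hstep
  refine ⟨by omega, ?_, ?_, ?_, ?_⟩
  · rw [hs2 0 (by omega) (by omega)]; exact h0
  · rw [hs2 1 (by omega) (by omega)]; exact h1
  · intro t h2t hta htn
    rcases eq_or_lt_of_le (show t ≤ a by omega) with rfl | hlt2
    · rw [hs3, show min i.toNat (t - 1).toNat = i.toNat by omega]
    · rw [hs2 t (by omega) (by omega)]
      exact hlt t h2t hlt2 htn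
  · intro t hat htn
    rw [hs2 t (by omega) (by omega)]
    exact hge t (by omega) htn

theorem innerA_fold (n : Int) (p : List Int) (i : Int)
    (hp : SpecP p) (hlen : p.length = n.toNat) (hi : 1 ≤ i) (hin : i < n) :
    ∀ (a : Int) (dist : List (Option Int)), i < a → a ≤ n + 1 → InvMid n p i a dist →
      InvMid n p i (n + 1) ((PySem.List.pyRange a (n + 1) 1).foldl (innerStepA i) dist) := by
  have H : ∀ (k : ℕ) (a : Int) (dist : List (Option Int)), (n + 1 - a).toNat = k →
      i < a → a ≤ n + 1 → InvMid n p i a dist →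
      InvMid n p i (n + 1) ((PySem.List.pyRange a (n + 1) 1).foldl (innerStepA i) dist) := by
    intro k
    induction k with
    | zero =>
      intro a dist hk h1 h2 h3
      have ha : a = n + 1 := by omega
      subst ha
      rw [PySem.List.pyRange_one_eq_nil (le_refl _)]
      simpa using h3
    | succ kk ih =>
      intro a dist hk h1 h2 h3
      rw [PySem.List.pyRange_one_cons (by omega)]
      simp only [List.foldl_cons]
      exact ih (a + 1) (innerStepA i dist a) (by omega) (by omega) (by omega)
        (innerA_step n p i a dist hp hlen hi hin h1 (by omega) h3)
  intro a dist h1 h2 h3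
  exact H (n + 1 - a).toNat a dist rfl h1 h2 h3

theorem outerA_step (n : Int) (p : List Int) (i : Int) (dist : List (Option Int))
    (hp : SpecP p) (hlen : p.length = n.toNat) (hi : 1 ≤ i) (hin : i < n)
    (h : InvA n p (i.toNat - 1) dist) : InvA n p i.toNat (outerStepA n dist i) := by
  unfold outerStepA
  obtain ⟨hL, h0, h1, hrest⟩ := h
  have hmid : InvMid n p i (i + 1) dist := by
    refine ⟨hL, h0, h1, ?_, ?_⟩
    · intro t h2t hti htn
      rw [hrest t h2t htn]
      congr 1
      omega
    · intro t hti htn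
      rw [hrest t (by omega) htn]
      congr 1
      omega
  obtain ⟨hL2, h02, h12, hc1, _⟩ :=
    innerA_fold n p i hp hlen hi hin (i + 1) dist (by omega) (by omega) hmid
  exact ⟨hL2, h02, h12, fun t h2t htn => hc1 t h2t (by omega) htn⟩

theorem outerA_fold (n : Int) (p : List Int)
    (hp : SpecP p) (hlen : p.length = n.toNat) (hn : 1 ≤ n) :
    ∀ (a : Int) (dist : List (Option Int)), 1 ≤ a → a ≤ n → InvA n p (a.toNat - 1) dist →
      InvA n p (n.toNat - 1) ((PySem.List.pyRange a n 1).foldl (outerStepA n) dist) := by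
  have H : ∀ (k : ℕ) (a : Int) (dist : List (Option Int)), (n - a).toNat = k →
      1 ≤ a → a ≤ n → InvA n p (a.toNat - 1) dist →
      InvA n p (n.toNat - 1) ((PySem.List.pyRange a n 1).foldl (outerStepA n) dist) := by
    intro k
    induction k with
    | zero =>
      intro a dist hk h1 h2 h3
      have ha : a = n := by omega
      subst ha
      rw [PySem.List.pyRange_one_eq_nil (le_refl _)]
      simpa using h3
    | succ kk ih =>
      intro a dist hk h1 h2 h3
      rw [PySem.List.pyRange_one_cons (by omega)]
      simp only [List.foldl_cons]
      have hstep := outerA_step n p a dist hp hlen h1 (by omega) h3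
      have : a.toNat = (a + 1).toNat - 1 := by omega
      rw [this] at hstep
      exact ih (a + 1) (outerStepA n dist a) (by omega) (by omega) (by omega) hstep
  intro a dist h1 h2 h3
  exact H (n - a).toNat a dist rfl h1 h2 h3

theorem solveA_eq (n : Int) (p : List Int)
    (hp : SpecP p) (hlen : p.length = n.toNat) (hn : 1 ≤ n) :
    solve n = p.getD (n.toNat - 1) 0 := by
  unfold solve
  dsimp only
  have hrep : ((List.replicate (n + 1).toNat (none : Option Int)).length : Int) = n + 1 := by
    simp; omega
  have hinit : InvA n p 0
      (PySem.List.pySetD (List.replicate (n + 1).toNat (none : Option Int)) 1 (some 0)) := by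
    refine ⟨?_, ?_, ?_, ?_⟩
    · rw [PySem.List.pySetD_of_nonneg _ _ (by omega : (0 : Int) ≤ 1)]; simp
    · rw [getD_setD _ 1 (by omega) (by omega) _ 0 (by omega), if_neg (by omega),
          G_replicate _ _ (le_refl 0)]
    · rw [getD_setD _ 1 (by omega) (by omega) _ 1 (by omega), if_pos rfl]
    · intro t h2t htn
      rw [getD_setD _ 1 (by omega) (by omega) _ t (by omega), if_neg (by omega),
          G_replicate _ _ (by omega)]
      simp [pval]
  have h0 : (1 : Int).toNat - 1 = 0 := rfl
  have hfin := outerA_fold n p hp hlen hn 1 _ (by omega) hn (by rw [h0]; exact hinit)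
  obtain ⟨hL, _, h1, hc⟩ := hfin
  rcases eq_or_lt_of_le hn with heq | hgt
  · subst heq
    unfold G at h1
    rw [h1]
    have hp0 := hp.1
    rw [List.getD_eq_getElem?_getD] at hp0
    simp [hp0]
  · have hc2 := hc n (by omega) (le_refl n)
    unfold G at hc2
    rw [hc2]
    unfold pval
    rw [if_neg (by omega), show min (n.toNat - 1) ((n - 1).toNat) = n.toNat - 1 by omega]
    have := hp.2 n.toNat (by omega) (by omega)
    rw [show ((n.toNat : ℕ) : Int) = n by omega] at this
    rw [this]
    rfl

theorem getD_take (p : List Int) (m k : ℕ) (h : k < m) : (p.take m).getD k 0 = p.getD k 0 := by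
  rw [List.getD_eq_getElem?_getD, List.getD_eq_getElem?_getD, List.getElem?_take]
  simp [h]

set_option maxRecDepth 8192 in
theorem stepB_inv (n : Int) (p : List Int) (j : Int) (st : List (Option Int) × Int)
    (hp : SpecP p) (hlen : p.length = n.toNat) (hj : 2 ≤ j) (hjn : j ≤ n)
    (h : InvB p (j.toNat - 1) st) : InvB p j.toNat (stepB st j) := by
  obtain ⟨hL, hres, hans⟩ := h
  have hpne : p ≠ [] := by intro hc; rw [hc] at hlen; simp at hlen; omega
  have hj0 : 1 ≤ j.toNat - 1 := by omega
  have hj0len : j.toNat - 1 < p.length := by omega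
  -- the candidate list, rewritten through the invariant
  have hcands : (PySem.List.pyRange 0 1000 1).filterMap (fun r =>
        (PySem.List.pyGetD st.1 r none).map
          (fun v => v + (PySem.Int.mod (179 * r + 719 * j) 1000 - 500))) =
      (PySem.List.pyRange 0 1000 1).filterMap (fun r =>
        (mnO (resL p (j.toNat - 1) r)).map
          (fun v => v + (PySem.Int.mod (179 * r + 719 * j) 1000 - 500))) := by
    apply List.filterMap_congr
    intro r hr
    rw [PySem.List.mem_pyRange_one] at hr
    have hg := hres r hr.1 hr.2
    unfold G at hg
    rw [hg]
  set CS := (PySem.List.pyRange 0 1000 1).filterMap (fun r =>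
        (mnO (resL p (j.toNat - 1) r)).map
          (fun v => v + (PySem.Int.mod (179 * r + 719 * j) 1000 - 500))) with hCS
  have hmem : ∀ x, x ∈ CS ↔ ∃ r, 0 ≤ r ∧ r < 1000 ∧ resL p (j.toNat - 1) r ≠ [] ∧
      x = mn (resL p (j.toNat - 1) r) + (PySem.Int.mod (179 * r + 719 * j) 1000 - 500) := by
    intro x
    rw [hCS]
    simp only [List.mem_filterMap, PySem.List.mem_pyRange_one]
    constructor
    · rintro ⟨r, ⟨hr0, hr1⟩, hx⟩
      by_cases hne : resL p (j.toNat - 1) r = []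
      · rw [hne] at hx; simp [mnO] at hx
      · rw [mnO_eq_some _ hne] at hx
        simp only [Option.map_some, Option.some.injEq] at hx
        exact ⟨r, hr0, hr1, hne, hx.symm⟩
    · rintro ⟨r, hr0, hr1, hne, rfl⟩
      exact ⟨r, ⟨hr0, hr1⟩, by rw [mnO_eq_some _ hne]; rfl⟩
  have hFj : p.getD (j.toNat - 1) 0 = mn (cand (p.take (j.toNat - 1)) j) := by
    have hs := hp.2 j.toNat (by omega) (by omega)
    rw [show ((j.toNat : ℕ) : Int) = j by omega] at hs
    exact hs
  have hmod1 : PySem.Int.mod 1 1000 = 1 := by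
    rw [PySem.Int.mod_eq_emod_of_pos (by norm_num)]
    decide
  have h1res : p.getD 0 0 ∈ resL p (j.toNat - 1) 1 := by
    rw [mem_resL]
    exact ⟨1, le_refl 1, by omega, hmod1, rfl⟩
  have hCS_ne : CS ≠ [] := by
    have hx : mn (resL p (j.toNat - 1) 1) + (PySem.Int.mod (179 * 1 + 719 * j) 1000 - 500) ∈ CS :=
      (hmem _).mpr ⟨1, by omega, by omega, List.ne_nil_of_mem h1res, rfl⟩
    exact List.ne_nil_of_mem hx
  have htake_len : (p.take (j.toNat - 1)).length = j.toNat - 1 := by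
    simp [List.length_take]; omega
  have hcand_ne : cand (p.take (j.toNat - 1)) j ≠ [] := cand_take_ne_nil p _ hj0 hpne j
  have hmn : mn CS = mn (cand (p.take (j.toNat - 1)) j) := by
    apply mn_eq_mn _ _ hCS_ne hcand_ne
    · -- every bucket candidate is matched by a direct candidate
      intro x hx
      obtain ⟨r, hr0, hr1, hne, rfl⟩ := (hmem x).mp hx
      have hmnmem := mn_mem _ hne
      obtain ⟨i, hi1, hi2, hir, hiv⟩ := (mem_resL p _ r _).mp hmnmem
      refine ⟨p.getD (i.toNat - 1) 0 + weight i j, ?_, ?_⟩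
      · rw [mem_cand]
        refine ⟨i.toNat - 1, by rw [htake_len]; omega, ?_⟩
        rw [getD_take p (j.toNat - 1) (i.toNat - 1) (by omega),
            show (((i.toNat - 1 : ℕ) : Int) + 1) = i by omega]
      · rw [← hiv, weight_mod, hir]
    · -- every direct candidate dominates its bucket's candidate
      intro y hy
      obtain ⟨k, hk, rfl⟩ := (mem_cand _ _ _).mp hy
      rw [htake_len] at hk
      have hkres : p.getD k 0 ∈ resL p (j.toNat - 1) (PySem.Int.mod ((k : Int) + 1) 1000) := by
        rw [mem_resL]
        exact ⟨(k : Int) + 1, by omega, by omega, rfl, by simp⟩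
      refine ⟨mn (resL p (j.toNat - 1) (PySem.Int.mod ((k : Int) + 1) 1000)) +
          (PySem.Int.mod (179 * PySem.Int.mod ((k : Int) + 1) 1000 + 719 * j) 1000 - 500), ?_, ?_⟩
      · exact (hmem _).mpr ⟨PySem.Int.mod ((k : Int) + 1) 1000,
          PySem.Int.mod_nonneg _ (by norm_num), PySem.Int.mod_lt _ (by norm_num),
          List.ne_nil_of_mem hkres, rfl⟩
      · rw [getD_take p (j.toNat - 1) k hk, weight_mod]
        have := mn_le _ _ hkres
        omega
  have hdj : (PySem.List.min? CS (fun x => x)).getD 0 = p.getD (j.toNat - 1) 0 := by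
    obtain ⟨c, t, hct⟩ := List.exists_cons_of_ne_nil hCS_ne
    rw [hFj, ← hmn, hct, PySem.List.min?_id_cons]
    rfl
  -- now the update of best
  have hrstar0 : 0 ≤ PySem.Int.mod j 1000 := PySem.Int.mod_nonneg _ (by norm_num)
  have hrstar1 : PySem.Int.mod j 1000 < 1000 := PySem.Int.mod_lt _ (by norm_num)
  have hcastj : ((j.toNat - 1 : ℕ) : Int) + 1 = j := by omega
  have hresSucc : ∀ r' : Int, resL p (j.toNat - 1 + 1) r' = resL p (j.toNat - 1) r' ++
      (if PySem.Int.mod j 1000 = r' then [p.getD (j.toNat - 1) 0] else []) := by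
    intro r'
    rw [resL_succ, hcastj]
  unfold stepB
  dsimp only
  rw [hcands]
  unfold InvB
  refine ⟨?_, ?_, ?_⟩
  · -- length
    split
    · rw [PySem.List.pySetD_of_nonneg _ _ hrstar0]; simpa using hL
    · split
      · rw [PySem.List.pySetD_of_nonneg _ _ hrstar0]; simpa using hL
      · exact hL
  · -- buckets
    intro r' hr'0 hr'1
    rw [show j.toNat = j.toNat - 1 + 1 by omega, hresSucc r']
    by_cases heq : PySem.Int.mod j 1000 = r'
    · rw [if_pos heq]
      have holdG : G st.1 (PySem.Int.mod j 1000) = mnO (resL p (j.toNat - 1) r') := by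
        rw [heq]; exact hres r' hr'0 hr'1
      unfold G at holdG
      by_cases hne : resL p (j.toNat - 1) r' = []
      · rw [hne] at holdG
        simp only [mnO] at holdG
        rw [holdG]
        dsimp only
        rw [getD_setD st.1 _ hrstar0 (by omega) _ r' (by omega), if_pos heq.symm, hne, hdj]
        simp [mnO]
      · rw [mnO_eq_some _ hne] at holdG
        rw [holdG]
        dsimp only
        rw [mnO_eq_some _ (by simp), mn_append _ _ hne, hdj]
        by_cases hlt : p.getD (j.toNat - 1) 0 < mn (resL p (j.toNat - 1) r')
        · rw [if_pos hlt, getD_setD st.1 _ hrstar0 (by omega) _ r' (by omega), if_pos heq.symm]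
          congr 1
          omega
        · rw [if_neg hlt]
          have := hres r' hr'0 hr'1
          rw [this, mnO_eq_some _ hne]
          congr 1
          omega
    · rw [if_neg heq]
      simp only [List.append_nil]
      have hG : G (match PySem.List.pyGetD st.1 (PySem.Int.mod j 1000) none with
          | none => PySem.List.pySetD st.1 (PySem.Int.mod j 1000)
              (some ((PySem.List.min? CS (fun x => x)).getD 0))
          | some v => if (PySem.List.min? CS (fun x => x)).getD 0 < v then
              PySem.List.pySetD st.1 (PySem.Int.mod j 1000)
                (some ((PySem.List.min? CS (fun x => x)).getD 0)) else st.1) r' = G st.1 r' := by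
        rcases hcase : PySem.List.pyGetD st.1 (PySem.Int.mod j 1000) none with _ | v
        · dsimp only
          rw [getD_setD st.1 _ hrstar0 (by omega) _ r' (by omega), if_neg (fun hc => heq hc.symm)]
        · dsimp only
          split
          · rw [getD_setD st.1 _ hrstar0 (by omega) _ r' (by omega), if_neg (fun hc => heq hc.symm)]
          · rfl
      rw [hG]
      exact hres r' hr'0 hr'1
  · -- the answer component
    rw [hdj]

theorem foldB (n : Int) (p : List Int)
    (hp : SpecP p) (hlen : p.length = n.toNat) (hn : 1 ≤ n) :
    ∀ (a : Int) (st : List (Option Int) × Int), 2 ≤ a → a ≤ n + 1 → InvB p (a.toNat - 1) st →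
      InvB p n.toNat ((PySem.List.pyRange a (n + 1) 1).foldl stepB st) := by
  have H : ∀ (k : ℕ) (a : Int) (st : List (Option Int) × Int), (n + 1 - a).toNat = k →
      2 ≤ a → a ≤ n + 1 → InvB p (a.toNat - 1) st →
      InvB p n.toNat ((PySem.List.pyRange a (n + 1) 1).foldl stepB st) := by
    intro k
    induction k with
    | zero =>
      intro a st hk h1 h2 h3
      have ha : a = n + 1 := by omega
      subst ha
      rw [PySem.List.pyRange_one_eq_nil (le_refl _)]
      have hc : (n + 1).toNat - 1 = n.toNat := by omega
      rw [hc] at h3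
      exact h3
    | succ kk ih =>
      intro a st hk h1 h2 h3
      rw [PySem.List.pyRange_one_cons (by omega)]
      simp only [List.foldl_cons]
      have hstep := stepB_inv n p a st hp hlen h1 (by omega) h3
      have hcast : a.toNat = (a + 1).toNat - 1 := by omega
      rw [hcast] at hstep
      exact ih (a + 1) (stepB st a) (by omega) (by omega) (by omega) hstep
  intro a st h1 h2 h3
  exact H (n + 1 - a).toNat a st rfl h1 h2 h3

theorem solveB_eq (n : Int) (p : List Int)
    (hp : SpecP p) (hlen : p.length = n.toNat) (hn : 1 ≤ n) :
    solve_alt n = p.getD (n.toNat - 1) 0 := by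
  unfold solve_alt
  dsimp only
  have hrep : ((List.replicate 1000 (none : Option Int)).length : Int) = 1000 := by
    rw [List.length_replicate]; rfl
  have hinit : InvB p 1
      (PySem.List.pySetD (List.replicate 1000 (none : Option Int)) 1 (some 0), 0) := by
    refine ⟨by rw [PySem.List.pySetD_of_nonneg _ _ (by omega : (0 : Int) ≤ 1), List.length_set,
        List.length_replicate], ?_, ?_⟩
    · intro r hr0 hr1
      have hm1 : PySem.Int.mod 1 1000 = 1 := by
        rw [PySem.Int.mod_eq_emod_of_pos (by norm_num)]; decide
      have hres1 : resL p 1 r = if r = 1 then [p.getD 0 0] else [] := by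
        unfold resL
        rw [show ((1 : ℕ) : Int) + 1 = 1 + 1 by norm_num, PySem.List.pyRange_one_singleton,
            List.filter_singleton, hm1]
        by_cases hr : r = 1
        · rw [if_pos hr, hr]
          simp
        · have : (1 == r) = false := by simpa using fun hc => hr hc.symm
          rw [this, if_neg hr]
          rfl
      rw [getD_setD _ 1 (by omega) (by omega) _ r hr0, hres1]
      by_cases hr : r = 1
      · rw [if_pos hr, if_pos hr, mnO_eq_some _ (by simp)]
        rw [show mn [p.getD 0 0] = p.getD 0 0 from rfl, hp.1]
      · rw [if_neg hr, if_neg hr, G_replicate _ _ hr0]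
        rfl
    · exact hp.1.symm
  have h21 : (2 : Int).toNat - 1 = 1 := rfl
  have hfin := foldB n p hp hlen hn 2 _ (by omega) (by omega) (by rw [h21]; exact hinit)
  exact hfin.2.2

-- ===== VERDICT (by name: the statement is the Claim_ definition above) =====
theorem solve_spec : Claim_equal_solve := by
  intro n _ hn
  have hn' : 1 ≤ n := hn
  have hlen : (Lspec (n.toNat - 1)).length = n.toNat := by
    rw [length_Lspec]; omega
  unfold Spec_solve
  rw [solveA_eq n _ (specP_Lspec _) hlen hn', solveB_eq n _ (specP_Lspec _) hlen hn']
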